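-- pv_equiv track=rewrite | github.com/LuminaScript/sonic-mgmt | tests/community/route_helpers.py | generate_ip_route_commands
-- ===== SOURCE A (Python) =====
-- import ipaddress
--
-- ROUTE_NETWORK = ipaddress.IPv4Network("40.0.0.0/16")
--
-- def generate_ip_route_commands(action, num_routes, nexthop):
--     """
--     Yield 'ip route' commands for the given action (generator; no full list in memory).
--
--     Uses ipaddress for correctness. Skips .0 and .255 in each /24 to avoid
--     network/broadcast addresses.
--
--     Args:
--         action: "add" or "del"
--         num_routes: how many /32 routes to generate (in 40.0.0.0/16)
--         nexthop: gateway IP address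
--
--     Yields:
--         command strings, e.g. "ip route add 40.0.0.1/32 via 10.0.0.1", ...
--     """
--     base = int(ROUTE_NETWORK.network_address)
--     hosts_per_net = 254
--     for i in range(num_routes):
--         block = i // hosts_per_net
--         host = (i % hosts_per_net) + 1
--         addr = ipaddress.IPv4Address(base + block * 256 + host)
--         yield f"ip route {action} {addr}/32 via {nexthop}"
-- ===== SOURCE B (Python) =====
-- def generate_ip_route_commands(action, num_routes, nexthop):
--     # Staged block decomposition: one divmod on the total count up front,
--     # then nested loops -- full /24 blocks of 254 hosts, then the partial tail block.
--     # Addresses live in 40.0.0.0+: render the dotted quad from the integer's 4 bytes.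
--     base = 40 << 24  # int(IPv4Address("40.0.0.0"))
--     full, rem = divmod(max(num_routes, 0), 254)
--     for block in range(full + 1):
--         count = 254 if block < full else rem
--         net = base + block * 256
--         for host in range(1, count + 1):
--             n = net + host
--             addr = f"{(n >> 24) & 255}.{(n >> 16) & 255}.{(n >> 8) & 255}.{n & 255}"
--             yield f"ip route {action} {addr}/32 via {nexthop}"
-- ===== Notes on version B (the rewrite author's own statement) =====
-- stated objective: alternative
-- what changed: B does a single divmod of num_routes by 254 up front and then emits routes block-by-block with nested loops (full /24 blocks of 254 hosts, then the partial tail block), instead of A's single index loop computing block=i//254 and host=i%254+1 per element.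
import Mathlib
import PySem

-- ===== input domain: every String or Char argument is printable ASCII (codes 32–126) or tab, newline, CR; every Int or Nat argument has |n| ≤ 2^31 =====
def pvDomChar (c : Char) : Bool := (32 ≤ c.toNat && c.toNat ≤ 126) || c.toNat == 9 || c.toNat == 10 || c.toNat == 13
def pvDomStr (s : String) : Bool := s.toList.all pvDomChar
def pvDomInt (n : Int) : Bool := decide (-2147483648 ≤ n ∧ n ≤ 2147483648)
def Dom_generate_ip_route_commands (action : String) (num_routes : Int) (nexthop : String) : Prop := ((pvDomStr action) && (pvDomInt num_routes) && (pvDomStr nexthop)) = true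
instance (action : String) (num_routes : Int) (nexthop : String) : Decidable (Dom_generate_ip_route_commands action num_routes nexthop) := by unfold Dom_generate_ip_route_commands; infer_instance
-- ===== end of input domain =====

-- B restructures A's single index loop (block=i//254, host=i%254+1 per element) into one up-front divmod plus nested block/host loops (alternative decomposition; return-value equivalence of the yielded sequences).


-- str(ipaddress.IPv4Address(n)) for 0 ≤ n < 2^32: dotted-quad rendering of the 4 bytes
def pvDotted (n : Int) : String :=
  PySem.Int.toStr (PySem.Int.mod (PySem.Int.floordiv n 16777216) 256) ++ "." ++
  PySem.Int.toStr (PySem.Int.mod (PySem.Int.floordiv n 65536) 256) ++ "." ++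
  PySem.Int.toStr (PySem.Int.mod (PySem.Int.floordiv n 256) 256) ++ "." ++
  PySem.Int.toStr (PySem.Int.mod n 256)

-- the f-string "ip route {action} {addr}/32 via {nexthop}" (addr given as an integer)
def pvCmd (action nexthop : String) (addr : Int) : String :=
  "ip route " ++ action ++ " " ++ pvDotted addr ++ "/32 via " ++ nexthop

-- ===== PORT A =====
def generate_ip_route_commands (action : String) (num_routes : Int) (nexthop : String) : List String :=
  (PySem.List.pyRange 0 num_routes 1).map (fun i =>
    let block := PySem.Int.floordiv i 254
    let host := PySem.Int.mod i 254 + 1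
    pvCmd action nexthop (671088640 + block * 256 + host))

-- ===== PORT B =====
-- Source B: full, rem = divmod(max(num_routes,0), 254); nested loops over blocks then hosts
def generate_ip_route_commands_alt (action : String) (num_routes : Int) (nexthop : String) : List String :=
  let n := max num_routes 0
  let full := PySem.Int.floordiv n 254
  let rem := PySem.Int.mod n 254
  (PySem.List.pyRange 0 (full + 1) 1).flatMap (fun block =>
    let count := if block < full then (254 : Int) else rem
    let net := 671088640 + block * 256
    (PySem.List.pyRange 1 (count + 1) 1).map (fun host => pvCmd action nexthop (net + host)))

-- ===== PRECONDITION & SPEC =====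
def Spec_generate_ip_route_commands (action : String) (num_routes : Int) (nexthop : String) (out : List String) : Prop := out = generate_ip_route_commands_alt action num_routes nexthop
instance (action : String) (num_routes : Int) (nexthop : String) (out : List String) : Decidable (Spec_generate_ip_route_commands action num_routes nexthop out) := by unfold Spec_generate_ip_route_commands; infer_instance

-- ===== CLAIM (what is proved, stated in full; the proofs are below) =====
def Claim_equal_generate_ip_route_commands : Prop := ∀ (action : String) (num_routes : Int) (nexthop : String), Dom_generate_ip_route_commands action num_routes nexthop → Spec_generate_ip_route_commands action num_routes nexthop (generate_ip_route_commands action num_routes nexthop)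

-- ===== LEMMAS AND PROOFS =====

-- the command for global route index k (both programs emit pvG k as the k-th route)
def pvG (action nexthop : String) (k : Nat) : String :=
  pvCmd action nexthop (671088640 + ((k / 254 : Nat) : Int) * 256 + (((k % 254 : Nat) : Int) + 1))

theorem pv_divmod254 (b h : Int) (h0 : 0 ≤ h) (h1 : h < 254) :
    PySem.Int.floordiv (b * 254 + h) 254 = b ∧ PySem.Int.mod (b * 254 + h) 254 = h := by
  have hd : PySem.Int.floordiv (b * 254 + h) 254 = b := by
    rw [PySem.Int.floordiv_eq_iff_of_pos (by omega)]
    constructor <;> nlinarith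
  refine ⟨hd, ?_⟩
  have := PySem.Int.floordiv_mul_add_mod (b * 254 + h) 254
  rw [hd] at this; omega

theorem pv_blocks (g : Nat → String) :
    ∀ F : Nat, (List.range F).flatMap (fun b => (List.range 254).map (fun j => g (b * 254 + j)))
      = (List.range (F * 254)).map g := by
  intro F
  induction F with
  | zero => simp
  | succ F ih =>
    rw [show List.range (F+1) = List.range F ++ [F] from List.range_succ,
        List.flatMap_append, ih, show (F + 1) * 254 = F * 254 + 254 by ring,
        List.range_add, List.map_append]
    simp [List.map_map, Function.comp]

theorem pvA_eq (action nexthop : String) (num_routes : Int) :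
    generate_ip_route_commands action num_routes nexthop
      = (List.range num_routes.toNat).map (pvG action nexthop) := by
  unfold generate_ip_route_commands
  rw [PySem.List.pyRange_one, List.map_map, Int.sub_zero]
  apply List.map_congr_left
  intro k _
  simp only [Function.comp, zero_add]
  have hdm := pv_divmod254 ((k / 254 : Nat) : Int) ((k % 254 : Nat) : Int) (by omega)
    (by have := Nat.mod_lt k (show 0 < 254 by omega); omega)
  have hk : (k : Int) = ((k / 254 : Nat) : Int) * 254 + ((k % 254 : Nat) : Int) := by
    push_cast; omega
  simp only [pvG]
  rw [hk, hdm.1, hdm.2]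

theorem pvB_eq (action nexthop : String) (num_routes : Int) :
    generate_ip_route_commands_alt action num_routes nexthop
      = (List.range num_routes.toNat).map (pvG action nexthop) := by
  unfold generate_ip_route_commands_alt
  set N := num_routes.toNat with hN
  have hmax : max num_routes 0 = (N : Int) := by omega
  have hn : (N : Int) = ((N / 254 : Nat) : Int) * 254 + ((N % 254 : Nat) : Int) := by
    push_cast; omega
  have hdm := pv_divmod254 ((N / 254 : Nat) : Int) ((N % 254 : Nat) : Int) (by omega)
    (by have := Nat.mod_lt N (show 0 < 254 by omega); omega)
  simp only [hmax, hn, hdm.1, hdm.2]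
  rw [show ((N / 254 : Nat) : Int) + 1 = ((N / 254 + 1 : Nat) : Int) by push_cast; ring,
      PySem.List.pyRange_zero_natCast, List.flatMap_map]
  rw [show List.range (N/254+1) = List.range (N/254) ++ [N/254] from List.range_succ,
      List.flatMap_append]
  conv_rhs => rw [show N = N/254*254 + N%254 by omega, List.range_add, List.map_append]
  congr 1
  · refine Eq.trans (List.flatMap_congr ?_) (pv_blocks (pvG action nexthop) (N/254))
    intro b hb
    simp only [List.mem_range] at hb
    rw [if_pos (by exact_mod_cast hb), PySem.List.pyRange_one,
        show ((254:Int) + 1 - 1).toNat = 254 by decide, List.map_map]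
    apply List.map_congr_left
    intro j hj
    simp only [List.mem_range] at hj
    simp only [Function.comp, pvG]
    apply congrArg
    have h1 : (b * 254 + j) / 254 = b := by omega
    have h2 : (b * 254 + j) % 254 = j := by omega
    rw [h1, h2]; ring
  · simp only [List.flatMap_cons, List.flatMap_nil, List.append_nil]
    rw [if_neg (by push_cast; omega), PySem.List.pyRange_one,
        show (((N % 254 : Nat) : Int) + 1 - 1).toNat = N % 254 by omega]
    simp only [List.map_map]
    apply List.map_congr_left
    intro j hj
    simp only [List.mem_range] at hj
    simp only [Function.comp, pvG]
    apply congrArg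
    have h1 : (N / 254 * 254 + j) / 254 = N / 254 := by omega
    have h2 : (N / 254 * 254 + j) % 254 = j := by omega
    rw [h1, h2]; push_cast; ring


-- ===== VERDICT (by name: the statement is the Claim_ definition above) =====
theorem generate_ip_route_commands_spec : Claim_equal_generate_ip_route_commands := by
  intro action num_routes nexthop _
  show _ = _
  rw [pvA_eq, pvB_eq]
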